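-- pv_equiv track=rewrite | github.com/HomoYouDidnt/kloros | src/tool_synthesis/pre_execution_validator.py | _find_similar_tools
-- ===== SOURCE A (Python) =====
-- from typing import Dict, List, Optional, Tuple, Any
--
-- def _find_similar_tools(tool_name: str, all_tools: List[str]) -> List[str]:
--     """Find tools with similar names using fuzzy matching."""
--     similar = []
--     tool_lower = tool_name.lower().replace('_', ' ').replace('-', ' ')
--
--     for tool in all_tools:
--         tool_words = set(tool.lower().replace('_', ' ').replace('-', ' ').split())
--         query_words = set(tool_lower.split())
--
--         # Check for word overlap
--         overlap = len(tool_words & query_words)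
--         if overlap > 0:
--             similar.append((tool, overlap))
--
--     # Sort by overlap count
--     similar.sort(key=lambda x: x[1], reverse=True)
--     return [t[0] for t in similar[:5]]
-- ===== SOURCE B (Python) =====
-- def _find_similar_tools(tool_name, all_tools):
--     """Find tools with similar names, bucketing by word-overlap count (counting sort)."""
--     query_words = set(tool_name.lower().replace('_', ' ').replace('-', ' ').split())
--     buckets = [[] for _ in range(len(query_words) + 1)]
--     for tool in all_tools:
--         overlap = len(set(tool.lower().replace('_', ' ').replace('-', ' ').split()) & query_words)
--         if overlap > 0:
--             buckets[overlap].append(tool)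
--     result = []
--     for bucket in reversed(buckets):
--         for name in bucket:
--             if len(result) == 5:
--                 return result
--             result.append(name)
--     return result
-- ===== Notes on version B (the rewrite author's own statement) =====
-- stated objective: faster
-- what changed: A rebuilds the query word-set inside the loop for every tool, appends (tool, overlap) pairs and comparison-sorts them by overlap descending before taking the top 5; B builds the query word-set once, never sorts: it drops each matching tool name into a bucket indexed by its overlap count (bounded by the number of query words) and emits buckets from the highest count down, stopping at 5 names.
import Mathlib
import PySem

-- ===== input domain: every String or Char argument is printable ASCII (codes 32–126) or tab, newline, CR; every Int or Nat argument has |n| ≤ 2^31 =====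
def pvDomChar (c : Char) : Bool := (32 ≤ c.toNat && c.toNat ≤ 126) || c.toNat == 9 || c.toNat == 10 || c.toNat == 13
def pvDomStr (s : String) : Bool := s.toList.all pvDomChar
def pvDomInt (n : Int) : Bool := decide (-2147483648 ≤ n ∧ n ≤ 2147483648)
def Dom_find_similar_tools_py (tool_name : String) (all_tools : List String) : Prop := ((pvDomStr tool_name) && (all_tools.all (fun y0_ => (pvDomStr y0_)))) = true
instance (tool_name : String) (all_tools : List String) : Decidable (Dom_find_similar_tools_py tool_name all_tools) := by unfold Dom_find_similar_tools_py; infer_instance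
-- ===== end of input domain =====

-- B hoists the query word-set out of the loop and replaces A's comparison sort of
-- (tool, overlap) pairs by a counting/bucket emission over the bounded overlap values;
-- same return value (objective: faster, measured).

-- ===== PORT A =====
-- Literal port of A: collect (tool, overlap) for overlap > 0, stable-sort by overlap
-- descending, take the first 5, project the names.
def find_similar_tools_py (tool_name : String) (all_tools : List String) : List String :=
  let similar : List (String × Int) := []
  let tool_lower := PySem.Str.replace (PySem.Str.replace (PySem.Str.lower tool_name) "_" " ") "-" " "
  let similar := all_tools.foldl (fun similar tool =>
    let tool_words := PySem.Set.ofList (PySem.Str.split₀ (PySem.Str.replace (PySem.Str.replace (PySem.Str.lower tool) "_" " ") "-" " "))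
    let query_words := PySem.Set.ofList (PySem.Str.split₀ tool_lower)
    let overlap := PySem.List.len (PySem.Set.inter tool_words query_words)
    if overlap > 0 then similar ++ [(tool, overlap)] else similar) similar
  let similar := PySem.List.sorted similar (fun x => x.2) true
  (PySem.List.slice similar none (some 5)).map (fun t => t.1)

-- ===== PORT B =====
-- B helper: the inner 'for name in bucket' loop of Source B with its 'len(result) == 5' cap.
-- (Source B's early 'return' is rendered as plain continuation: once the cap is reached every
-- remaining step returns the accumulator unchanged, so the value is the same.)
def pvEmitBucket (bucket : List String) (result : List String) : List String :=
  match bucket with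
  | [] => result
  | name :: rest => if result.length == 5 then result else pvEmitBucket rest (result ++ [name])

-- B helper: the outer 'for bucket in reversed(buckets)' loop of Source B.
def pvEmitBuckets (bs : List (List String)) (result : List String) : List String :=
  match bs with
  | [] => result
  | b :: rest => pvEmitBuckets rest (pvEmitBucket b result)

-- Literal port of Source B: one scan appends each tool to buckets[overlap] (overlap ≤ number of
-- query words, so the index is always in range: List.set/getD render the in-place append),
-- then the buckets are emitted from the highest overlap down, capped at 5 names.
def find_similar_tools_py_alt (tool_name : String) (all_tools : List String) : List String :=
  let query_words := PySem.Set.ofList (PySem.Str.split₀ (PySem.Str.replace (PySem.Str.replace (PySem.Str.lower tool_name) "_" " ") "-" " "))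
  let buckets : List (List String) := List.replicate (query_words.length + 1) []
  let buckets := all_tools.foldl (fun buckets tool =>
    let overlap := (PySem.Set.inter (PySem.Set.ofList (PySem.Str.split₀ (PySem.Str.replace (PySem.Str.replace (PySem.Str.lower tool) "_" " ") "-" " "))) query_words).length
    if 0 < overlap then buckets.set overlap (buckets.getD overlap [] ++ [tool]) else buckets) buckets
  pvEmitBuckets buckets.reverse []

-- ===== PRECONDITION & SPEC =====
def Spec_find_similar_tools_py (tool_name : String) (all_tools : List String) (out : List String) : Prop := out = find_similar_tools_py_alt tool_name all_tools
instance (tool_name : String) (all_tools : List String) (out : List String) : Decidable (Spec_find_similar_tools_py tool_name all_tools out) := by unfold Spec_find_similar_tools_py; infer_instance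

-- ===== CLAIM (what is proved, stated in full; the proofs are below) =====
def Claim_equal_find_similar_tools_py : Prop := ∀ (tool_name : String) (all_tools : List String), Dom_find_similar_tools_py tool_name all_tools → Spec_find_similar_tools_py tool_name all_tools (find_similar_tools_py tool_name all_tools)

-- ===== LEMMAS AND PROOFS =====

-- insertBy walks past a prefix it does not insert into.
lemma pv_insertBy_append_not {α : Type} (before : α → α → Bool) (x : α) (l r : List α)
    (h : ∀ y ∈ l, before x y = false) :
    PySem.List.insertBy before x (l ++ r) = l ++ PySem.List.insertBy before x r := by
  induction l with
  | nil => rfl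
  | cons y t ih =>
    simp only [List.cons_append, PySem.List.insertBy, h y (by simp)]
    simp only [Bool.false_eq_true, if_false, List.cons.injEq, true_and]
    exact ih (fun z hz => h z (by simp [hz]))

-- insertBy inserts at the front when it goes before everything.
lemma pv_insertBy_all_before {α : Type} (before : α → α → Bool) (x : α) (r : List α)
    (h : ∀ y ∈ r, before x y = true) :
    PySem.List.insertBy before x r = x :: r := by
  cases r with
  | nil => rfl
  | cons y t => simp only [PySem.List.insertBy, h y (by simp), if_true]

-- Inserting a pair into a list of key-homogeneous blocks listed in strictly decreasing key
-- order appends it to the end of its own block.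
lemma pv_insert_blocks {α : Type} (g : Int → List (α × Int)) (hg : ∀ k p, p ∈ g k → p.2 = k)
    (x : α × Int) : ∀ ks : List Int, ks.Pairwise (fun a b => b < a) → x.2 ∈ ks →
    PySem.List.insertBy (fun a b => decide (b.2 < a.2)) x (ks.flatMap g)
      = ks.flatMap (fun k => g k ++ if x.2 = k then [x] else []) := by
  intro ks hks hx
  induction ks with
  | nil => simp at hx
  | cons k ks ih =>
    have hk : ∀ b ∈ ks, b < k := (List.pairwise_cons.mp hks).1
    have hks' := (List.pairwise_cons.mp hks).2
    simp only [List.flatMap_cons]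
    by_cases hv : x.2 = k
    · rw [pv_insertBy_append_not _ _ _ _ (fun y hy => by
        simp [hg k y hy, hv])]
      rw [pv_insertBy_all_before _ _ _ (fun y hy => by
        obtain ⟨k', hk', hy'⟩ := List.mem_flatMap.mp hy
        simp [hg k' y hy', hv, hk k' hk'])]
      have : ks.flatMap (fun k' => g k' ++ if x.2 = k' then [x] else []) = ks.flatMap g := by
        refine List.flatMap_congr (fun k' hk' => ?_)
        have : x.2 ≠ k' := by have := hk k' hk'; omega
        simp [this]
      rw [this, if_pos hv]
      simp
    · have hx' : x.2 ∈ ks := by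
        rcases List.mem_cons.mp hx with h | h
        · exact absurd h hv
        · exact h
      rw [pv_insertBy_append_not _ _ _ _ (fun y hy => by
        have h1 : x.2 < k := hk _ hx'
        simp [hg k y hy]; omega)]
      rw [ih hks' hx', if_neg hv]
      simp

-- Python's stable descending sort by key is the concatenation of the key-filtered blocks,
-- keys enumerated in strictly decreasing order (all keys occurring must be listed).
lemma pv_sorted_rev_blocks {α : Type} (ps : List (α × Int)) (ks : List Int)
    (hks : ks.Pairwise (fun a b => b < a)) (hmem : ∀ p ∈ ps, p.2 ∈ ks) :
    PySem.List.sorted ps (fun x => x.2) true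
      = ks.flatMap (fun k => ps.filter (fun p => p.2 == k)) := by
  induction ps using List.reverseRecOn with
  | nil => simp [PySem.List.sorted]
  | append_singleton ps x ih =>
    rw [PySem.List.sorted_rev_eq_foldl_insertBy, List.foldl_append,
      ← PySem.List.sorted_rev_eq_foldl_insertBy]
    simp only [List.foldl_cons, List.foldl_nil]
    rw [ih (fun p hp => hmem p (by simp [hp]))]
    rw [pv_insert_blocks (fun k => ps.filter (fun p => p.2 == k))
      (fun k p hp => by simpa using (List.mem_filter.mp hp).2) x ks hks (hmem x (by simp))]
    refine List.flatMap_congr (fun k hk => ?_)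
    rw [List.filter_append]
    congr 1
    by_cases h : x.2 = k <;> simp [h]

-- The element written by List.set into a mapped range, described pointwise.
lemma pv_map_range_set {β : Type} (f : Nat → β) (n k : Nat) (v : β) (hk : k < n) :
    ((List.range n).map f).set k v = (List.range n).map (fun j => if j = k then v else f j) := by
  apply List.ext_getElem
  · simp
  · intro i h1 h2
    simp only [List.getElem_set, List.getElem_map, List.getElem_range]
    rcases eq_or_ne i k with he | he
    · subst he; simp
    · rw [if_neg (Ne.symm he), if_neg he]

lemma pv_map_range_getD {β : Type} (f : Nat → β) (n k : Nat) (d : β) (hk : k < n) :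
    ((List.range n).map f).getD k d = f k := by
  rw [List.getD_eq_getElem?_getD]
  simp [hk]

-- B's bucket-filling loop: bucket k holds, in scan order, the tools of positive overlap k.
lemma pv_buckets_spec (ov : String → Nat) (q : Nat) (hov : ∀ t, ov t ≤ q) (ts : List String) :
    ts.foldl (fun buckets tool =>
        if 0 < ov tool then buckets.set (ov tool) (buckets.getD (ov tool) [] ++ [tool]) else buckets)
      (List.replicate (q + 1) [])
    = (List.range (q + 1)).map (fun k => ts.filter (fun t => decide (0 < ov t) && (ov t == k))) := by
  induction ts using List.reverseRecOn with
  | nil =>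
    simp only [List.foldl_nil, List.filter_nil]
    rw [List.map_const', List.length_range]
  | append_singleton ts t ih =>
    rw [List.foldl_append, ih]
    simp only [List.foldl_cons, List.foldl_nil]
    have hlt : ov t < q + 1 := Nat.lt_succ_of_le (hov t)
    by_cases h : 0 < ov t
    · rw [if_pos h, pv_map_range_getD _ _ _ _ hlt, pv_map_range_set _ _ _ _ hlt]
      refine List.map_congr_left (fun j hj => ?_)
      rw [List.filter_append]
      by_cases hje : j = ov t
      · subst hje; simp [h]
      · have : ¬ (ov t == j) = true := by simpa using fun e => hje e.symm
        simp only [if_neg hje]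
        simp [List.filter, this]
    · rw [if_neg h]
      refine List.map_congr_left (fun j hj => ?_)
      rw [List.filter_append]
      simp [List.filter, h]

-- take n absorbs an inner take n before an append.
lemma pv_take_take_append {α : Type} (l r : List α) (n : Nat) :
    (l.take n ++ r).take n = (l ++ r).take n := by
  rw [List.take_append, List.take_append, List.take_take, Nat.min_self]
  have h : n - (l.take n).length = n - l.length := by
    simp only [List.length_take]
    omega
  rw [h]

-- The inner emit loop is take 5 of the appended bucket.
lemma pv_emitBucket_eq (b acc : List String) (h : acc.length ≤ 5) :
    pvEmitBucket b acc = (acc ++ b).take 5 := by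
  induction b generalizing acc with
  | nil => simp [pvEmitBucket, List.take_of_length_le h]
  | cons x t ih =>
    simp only [pvEmitBucket]
    by_cases h5 : acc.length = 5
    · simp only [h5]
      rw [if_pos (by simp), List.take_append]
      simp [← h5, List.take_of_length_le (Nat.le_refl _)]
    · rw [if_neg (by simpa using h5), ih (acc ++ [x]) (by simp; omega)]
      simp

-- The outer emit loop is take 5 of the flattened buckets.
lemma pv_emitBuckets_eq (bs : List (List String)) (acc : List String) (h : acc.length ≤ 5) :
    pvEmitBuckets bs acc = (acc ++ bs.flatten).take 5 := by
  induction bs generalizing acc with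
  | nil => simp [pvEmitBuckets, List.take_of_length_le h]
  | cons b bs ih =>
    simp only [pvEmitBuckets, List.flatten_cons]
    rw [pv_emitBucket_eq b acc h, ih _ (List.length_take_le _ _), pv_take_take_append]
    simp

-- The two pipelines, abstracted over the per-tool overlap count ov and its bound q.
lemma pv_abstract (ts : List String) (ov : String → Nat) (q : Nat) (hov : ∀ t, ov t ≤ q) :
    (PySem.List.slice (PySem.List.sorted
        (ts.foldl (fun acc t => if ((ov t : Int) > 0) then acc ++ [(t, (ov t : Int))] else acc) [])
        (fun x => x.2) true) none (some 5)).map (fun p => p.1)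
    = pvEmitBuckets ((ts.foldl (fun buckets tool =>
          if 0 < ov tool then buckets.set (ov tool) (buckets.getD (ov tool) [] ++ [tool]) else buckets)
        (List.replicate (q + 1) [])).reverse) [] := by
  rw [PySem.List.foldl_append_ite (p := fun t => (ov t : Int) > 0) (f := fun t => (t, (ov t : Int)))]
  rw [List.nil_append]
  rw [pv_sorted_rev_blocks _ (List.map (fun k : Nat => (k : Int)) ((List.range (q + 1)).reverse))
    (by
      rw [List.pairwise_map, List.pairwise_reverse]
      exact List.pairwise_lt_range.imp (fun h => by exact_mod_cast h))
    (by
      intro p hp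
      obtain ⟨t, ht, rfl⟩ := List.mem_map.mp hp
      simp only [List.mem_map, List.mem_reverse, List.mem_range]
      exact ⟨ov t, Nat.lt_succ_of_le (hov t), rfl⟩)]
  rw [pv_buckets_spec ov q hov, ← List.map_reverse, pv_emitBuckets_eq _ [] (by simp),
    List.nil_append, ← List.flatMap_def, PySem.List.slice_to _ (by norm_num)]
  show ((List.take 5 _).map _) = _
  rw [List.map_take, List.map_flatMap, List.flatMap_map]
  congr 1
  refine List.flatMap_congr (fun k hk => ?_)
  rw [List.filter_map, List.map_map]
  have : (fun p : String × Int => p.1) ∘ (fun t => (t, (ov t : Int))) = fun t => t := rfl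
  rw [this, List.map_id', List.filter_filter]
  refine List.filter_congr (fun t ht => ?_)
  have hcast : ((ov t : Int) == (k : Int)) = (ov t == k) := by simp
  simp [Bool.and_comm, hcast]

theorem pv_main (tool_name : String) (all_tools : List String) :
    find_similar_tools_py tool_name all_tools = find_similar_tools_py_alt tool_name all_tools := by
  unfold find_similar_tools_py find_similar_tools_py_alt
  simp only [PySem.List.len_eq]
  exact pv_abstract all_tools
    (fun tool => (PySem.Set.inter
      (PySem.Set.ofList (PySem.Str.split₀ (PySem.Str.replace (PySem.Str.replace (PySem.Str.lower tool) "_" " ") "-" " ")))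
      (PySem.Set.ofList (PySem.Str.split₀ (PySem.Str.replace (PySem.Str.replace (PySem.Str.lower tool_name) "_" " ") "-" " ")))).length)
    (PySem.Set.ofList (PySem.Str.split₀ (PySem.Str.replace (PySem.Str.replace (PySem.Str.lower tool_name) "_" " ") "-" " "))).length
    (fun t => by
      apply List.Subperm.length_le
      apply List.Nodup.subperm
      · exact PySem.Set.nodup_inter _ _ (PySem.Set.nodup_ofList _)
      · intro x hx
        exact ((PySem.Set.mem_inter _ _ _).mp hx).2)

-- ===== VERDICT (by name: the statement is the Claim_ definition above) =====
theorem find_similar_tools_py_spec : Claim_equal_find_similar_tools_py := by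
  intro tool_name all_tools _
  unfold Spec_find_similar_tools_py
  exact pv_main tool_name all_tools
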